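-- pv_equiv track=rewrite | github.com/guromen/S-P | task_04.py | list_of_indexes
-- ===== SOURCE A (Python) =====
-- def list_of_indexes(count_max_min:int, max_min_el:int, copy_l:list):
--     list_of_index = []
--     ind = 0
--     for i in range(count_max_min):
--         ind = copy_l.index(max_min_el, ind)
--         list_of_index.append(ind)
--         ind += 1
--     return list_of_index
-- ===== SOURCE B (Python) =====
-- def list_of_indexes(count_max_min: int, max_min_el: int, copy_l: list):
--     if count_max_min <= 0:
--         return []
--     result = []
--     for i, v in enumerate(copy_l):
--         if v == max_min_el:
--             result.append(i)
--             if len(result) == count_max_min: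
--                 break
--     return result
-- ===== Notes on version B (the rewrite author's own statement) =====
-- stated objective: idiomatic
-- what changed: one enumerate scan over the list collecting indices of matching elements with an early break, instead of repeatedly calling list.index with a moving start offset
import Mathlib
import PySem

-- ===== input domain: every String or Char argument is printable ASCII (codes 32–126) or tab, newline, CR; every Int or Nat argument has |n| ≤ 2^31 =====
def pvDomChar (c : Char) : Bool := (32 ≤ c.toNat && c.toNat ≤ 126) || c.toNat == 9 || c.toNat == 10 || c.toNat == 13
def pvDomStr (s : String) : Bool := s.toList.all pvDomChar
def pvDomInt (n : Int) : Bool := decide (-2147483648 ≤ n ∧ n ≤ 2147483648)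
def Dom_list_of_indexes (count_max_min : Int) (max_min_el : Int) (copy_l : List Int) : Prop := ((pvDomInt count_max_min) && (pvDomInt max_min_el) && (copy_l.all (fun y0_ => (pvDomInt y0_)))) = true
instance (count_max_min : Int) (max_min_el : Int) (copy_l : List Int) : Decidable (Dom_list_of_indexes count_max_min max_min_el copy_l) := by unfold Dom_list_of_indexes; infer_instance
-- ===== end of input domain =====

-- B changes the algorithm: one enumerate scan collecting match indices with an early
-- break, instead of repeated list.index calls from a moving start offset (idiomatic).

-- ===== PORT A =====
-- A's loop: `for i in range(count): ind = copy_l.index(x, ind); append ind; ind += 1`.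
-- Python's `copy_l.index(x, ind)` with ind ≥ 0 (always the case here) is exactly
-- `(PySem.List.index? (copy_l.drop ind) x)` shifted by `ind`; `none` = ValueError
-- (excluded by Pre_; the port returns the accumulator there, a value never claimed).
def pvALoop (copy_l : List Int) (x : Int) : Nat → Nat → List Int → List Int
  | 0, _, acc => acc
  | n+1, ind, acc =>
    match PySem.List.index? (copy_l.drop ind) x with
    | none => acc
    | some j => pvALoop copy_l x n (ind + j + 1) (acc ++ [((ind : Int) + (j : Int))])

def list_of_indexes (count_max_min : Int) (max_min_el : Int) (copy_l : List Int) : List Int :=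
  pvALoop copy_l max_min_el count_max_min.toNat 0 []

-- ===== PORT B =====
-- Source B's loop: `for i, v in enumerate(copy_l): if v == x: append i; if len == count: break`;
-- `k` is the number of indices still to collect (count - len(result)).
def pvBScan (x : Int) : Nat → List Int → Int → List Int
  | _, [], _ => []
  | k, v :: vs, i =>
    if v = x then
      if k = 1 then [i] else i :: pvBScan x (k - 1) vs (i + 1)
    else pvBScan x k vs (i + 1)

def list_of_indexes_alt (count_max_min : Int) (max_min_el : Int) (copy_l : List Int) : List Int :=
  if count_max_min ≤ 0 then [] else pvBScan max_min_el count_max_min.toNat copy_l 0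

-- ===== PRECONDITION & SPEC =====
-- Pre_ excludes exactly the inputs on which A raises ValueError (count_max_min exceeds
-- the number of occurrences of max_min_el in copy_l); A returns on all other inputs.
def Pre_list_of_indexes (count_max_min : Int) (max_min_el : Int) (copy_l : List Int) : Prop :=
  count_max_min ≤ (copy_l.count max_min_el : Int)
instance (count_max_min : Int) (max_min_el : Int) (copy_l : List Int) : Decidable (Pre_list_of_indexes count_max_min max_min_el copy_l) := by unfold Pre_list_of_indexes; infer_instance

def pvWitness_list_of_indexes : Int × Int × List Int := (2, 5, [5, 1, 5])

def Spec_list_of_indexes (count_max_min : Int) (max_min_el : Int) (copy_l : List Int) (out : List Int) : Prop := out = list_of_indexes_alt count_max_min max_min_el copy_l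
instance (count_max_min : Int) (max_min_el : Int) (copy_l : List Int) (out : List Int) : Decidable (Spec_list_of_indexes count_max_min max_min_el copy_l out) := by unfold Spec_list_of_indexes; infer_instance

-- ===== CLAIM (what is proved, stated in full; the proofs are below) =====
def Claim_equal_list_of_indexes : Prop := ∀ (count_max_min : Int) (max_min_el : Int) (copy_l : List Int), Dom_list_of_indexes count_max_min max_min_el copy_l → Pre_list_of_indexes count_max_min max_min_el copy_l → Spec_list_of_indexes count_max_min max_min_el copy_l (list_of_indexes count_max_min max_min_el copy_l)


-- ===== LEMMAS AND PROOFS =====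

-- the list of indices (base i) of the occurrences of x: the common characterisation
def pvOccIdx (x : Int) : List Int → Int → List Int
  | [], _ => []
  | v :: vs, i => if v = x then i :: pvOccIdx x vs (i + 1) else pvOccIdx x vs (i + 1)

theorem pvBScan_eq_take (x : Int) (l : List Int) : ∀ (k : Nat) (i : Int), 1 ≤ k →
    pvBScan x k l i = (pvOccIdx x l i).take k := by
  induction l with
  | nil => intro k i hk; simp [pvBScan, pvOccIdx]
  | cons v vs ih =>
    intro k i hk
    by_cases hv : v = x
    · by_cases h1 : k = 1
      · subst h1; simp [pvBScan, pvOccIdx, hv]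
      · have hk2 : 1 ≤ k - 1 := by omega
        simp only [pvBScan, pvOccIdx, hv, if_neg h1, ih (k-1) (i+1) hk2]
        obtain ⟨m, rfl⟩ : ∃ m, k = m + 1 := ⟨k - 1, by omega⟩
        simp
    · simp [pvBScan, pvOccIdx, hv, ih k (i+1) hk]

theorem pvOccIdx_no_hit (x : Int) (pre suf : List Int) (hpre : x ∉ pre) : ∀ (b : Int),
    pvOccIdx x (pre ++ x :: suf) b = (b + pre.length) :: pvOccIdx x suf (b + pre.length + 1) := by
  induction pre with
  | nil => intro b; simp [pvOccIdx]
  | cons p ps ih =>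
    intro b
    have hp : p ≠ x := by intro h; exact hpre (by simp [h])
    have hps : x ∉ ps := fun h => hpre (by simp [h])
    simp only [List.cons_append, pvOccIdx, if_neg hp, ih hps (b+1), List.length_cons]
    have h1 : b + 1 + (ps.length : Int) = b + ((ps.length : Nat) + 1 : Nat) := by push_cast; ring
    rw [h1]

theorem pvALoop_eq_take (copy_l : List Int) (x : Int) : ∀ (n ind : Nat) (acc : List Int),
    n ≤ (copy_l.drop ind).count x →
    pvALoop copy_l x n ind acc = acc ++ (pvOccIdx x (copy_l.drop ind) (ind : Int)).take n := by
  intro n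
  induction n with
  | zero => intro ind acc _; simp [pvALoop]
  | succ n ih =>
    intro ind acc hn
    have hmem : x ∈ copy_l.drop ind := by
      have : 0 < (copy_l.drop ind).count x := by omega
      exact List.count_pos_iff.mp this
    obtain ⟨j, hj⟩ : ∃ j, PySem.List.index? (copy_l.drop ind) x = some j := by
      have := (PySem.List.index?_isSome_iff (xs := copy_l.drop ind) (v := x)).mpr hmem
      exact Option.isSome_iff_exists.mp this
    obtain ⟨pre, suf, hsplit, hlen, hxpre⟩ := (PySem.List.index?_eq_some_iff _ _ _).mp hj
    have hdrop : copy_l.drop (ind + j + 1) = suf := by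
      have h1 : copy_l.drop (ind + j + 1) = (copy_l.drop ind).drop (j + 1) := by
        rw [List.drop_drop]; ring_nf
      rw [h1, hsplit, ← hlen]
      simp [List.drop_append]
    have hcnt : (pre ++ x :: suf).count x = suf.count x + 1 := by
      have : pre.count x = 0 := List.count_eq_zero.mpr hxpre
      simp [List.count_append, this]
    have hn' : n ≤ (copy_l.drop (ind + j + 1)).count x := by
      rw [hdrop]; rw [hsplit, hcnt] at hn; omega
    have hocc : pvOccIdx x (copy_l.drop ind) (ind : Int)
        = ((ind : Int) + j) :: pvOccIdx x suf ((ind : Int) + j + 1) := by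
      rw [hsplit, pvOccIdx_no_hit x pre suf hxpre, hlen]
    simp only [pvALoop, hj]
    rw [ih (ind + j + 1) (acc ++ [((ind : Int) + (j : Int))]) hn', hdrop, hocc]
    simp [List.take_succ_cons]

-- ===== VERDICT (by name: the statement is the Claim_ definition above) =====
theorem list_of_indexes_spec : Claim_equal_list_of_indexes := by
  unfold Claim_equal_list_of_indexes
  intro c x l _ hpre
  unfold Spec_list_of_indexes list_of_indexes list_of_indexes_alt
  unfold Pre_list_of_indexes at hpre
  by_cases hc : c ≤ 0
  · have : c.toNat = 0 := Int.toNat_of_nonpos hc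
    simp [this, pvALoop, hc]
  · have hc1 : 1 ≤ c.toNat := by omega
    have hn : c.toNat ≤ (l.drop 0).count x := by
      simp only [List.drop_zero]
      omega
    rw [if_neg hc, pvBScan_eq_take x l c.toNat 0 hc1,
        pvALoop_eq_take l x c.toNat 0 [] hn]
    simp
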